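-- pv_equiv track=rewrite | github.com/dor132/advent-of-code | 2022/8-treetop-tree-house/treetop-tree-house.py | calc_visibles
-- ===== SOURCE A (Python) =====
-- def calc_visibles(tree_heights):
--   max = tree_heights[0]
--   visibles_indexes = [0] # first is always visible
--   for index, tree_height in enumerate(tree_heights[1:], 1):
--     if tree_height > max:
--       max = tree_height
--       visibles_indexes.append(index)
--
--   return visibles_indexes
-- ===== SOURCE B (Python) =====
-- def calc_visibles(tree_heights):
--   if not tree_heights:
--     return []
--   # pass 1: materialise prefix maxima
--   m = tree_heights[0]
--   prefix = []
--   for h in tree_heights: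
--     if h > m:
--       m = h
--     prefix.append(m)
--   # pass 2: index i >= 1 is visible exactly when the prefix maximum strictly rises
--   visibles = [0]
--   for i, (prev, cur) in enumerate(zip(prefix, prefix[1:]), 1):
--     if cur > prev:
--       visibles.append(i)
--   return visibles
-- ===== Notes on version B (the rewrite author's own statement) =====
-- stated objective: alternative
-- what changed: B first materialises the prefix-maxima sequence in one pass, then in a second pass collects the first index plus every index where adjacent prefix maxima strictly rise, instead of A's single running-max loop with in-loop appends.
import Mathlib
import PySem

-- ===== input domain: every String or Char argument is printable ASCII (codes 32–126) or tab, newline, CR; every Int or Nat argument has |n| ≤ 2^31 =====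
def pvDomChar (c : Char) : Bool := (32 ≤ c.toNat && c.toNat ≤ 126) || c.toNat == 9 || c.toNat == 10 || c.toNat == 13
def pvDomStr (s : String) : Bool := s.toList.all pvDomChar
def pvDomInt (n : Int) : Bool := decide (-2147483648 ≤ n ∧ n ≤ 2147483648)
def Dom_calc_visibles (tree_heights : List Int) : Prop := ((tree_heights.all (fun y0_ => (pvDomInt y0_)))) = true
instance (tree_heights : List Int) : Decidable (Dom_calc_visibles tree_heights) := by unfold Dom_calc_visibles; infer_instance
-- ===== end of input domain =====

-- B replaces A's single running-max loop by two passes (prefix maxima, then adjacent strict rises); return-value equivalence on nonempty lists (A raises IndexError on the empty list, which Pre_ excludes).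

-- ===== PORT A =====
-- A: max = first element (IndexError on the empty list); then enumerate the rest from index 1
-- with state (max, visibles_indexes, index counter).
def calc_visibles (tree_heights : List Int) : List Int :=
  match tree_heights with
  | [] => []  -- Python raises IndexError here; excluded by Pre_calc_visibles
  | h :: t =>
    ((t.foldl (fun (st : Int × List Int × Int) x =>
        if x > st.1 then (x, st.2.1 ++ [st.2.2], st.2.2 + 1)
        else (st.1, st.2.1, st.2.2 + 1))
      (h, [0], 1))).2.1

-- ===== PORT B =====
def calc_visibles_alt (tree_heights : List Int) : List Int :=
  match tree_heights with
  | [] => []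
  | h0 :: _ =>
    -- pass 1: prefix maxima
    let pfx := ((tree_heights.foldl
      (fun (st : Int × List Int) h =>
        let m := if h > st.1 then h else st.1
        (m, st.2 ++ [m])) (h0, ([] : List Int)))).2
    -- pass 2: enumerate(zip(prefix, prefix[1:]), 1), collect i where cur > prev
    (((pfx.zip pfx.tail).foldl
      (fun (st : Int × List Int) pc =>
        (st.1 + 1, if pc.2 > pc.1 then st.2 ++ [st.1] else st.2))
      (1, [0]))).2

-- ===== PRECONDITION & SPEC =====
-- Pre_ excludes only the empty list, on which A's first-element access raises IndexError.
def Pre_calc_visibles (tree_heights : List Int) : Prop := tree_heights ≠ []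
instance (tree_heights : List Int) : Decidable (Pre_calc_visibles tree_heights) := by unfold Pre_calc_visibles; infer_instance
def pvWitness_calc_visibles : List Int := [3, 1, 4, 4, 5]

def Spec_calc_visibles (tree_heights : List Int) (out : List Int) : Prop := out = calc_visibles_alt tree_heights
instance (tree_heights : List Int) (out : List Int) : Decidable (Spec_calc_visibles tree_heights out) := by unfold Spec_calc_visibles; infer_instance

-- ===== CLAIM (what is proved, stated in full; the proofs are below) =====
def Claim_equal_calc_visibles : Prop := ∀ (tree_heights : List Int), Dom_calc_visibles tree_heights → Pre_calc_visibles tree_heights → Spec_calc_visibles tree_heights (calc_visibles tree_heights)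

-- ===== LEMMAS AND PROOFS =====

-- Reference recursion: visible indices among t, given current max m and next index idx.
def visAux (m idx : Int) : List Int → List Int
  | [] => []
  | h :: t => if h > m then idx :: visAux h (idx + 1) t else visAux m (idx + 1) t

-- Prefix-maxima sequence of t given current max m.
def pmList (m : Int) : List Int → List Int
  | [] => []
  | h :: t => (if h > m then h else m) :: pmList (if h > m then h else m) t

lemma foldA_eq (t : List Int) : ∀ (m idx : Int) (vis : List Int),
    ((t.foldl (fun (st : Int × List Int × Int) x =>
        if x > st.1 then (x, st.2.1 ++ [st.2.2], st.2.2 + 1)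
        else (st.1, st.2.1, st.2.2 + 1))
      (m, vis, idx))).2.1 = vis ++ visAux m idx t := by
  induction t with
  | nil => intro m idx vis; simp [visAux]
  | cons h t ih =>
    intro m idx vis
    simp only [List.foldl_cons, visAux]
    by_cases hc : h > m
    · simp [hc, ih]
    · simp [hc, ih]

lemma foldP_eq (t : List Int) : ∀ (m : Int) (acc : List Int),
    ((t.foldl (fun (st : Int × List Int) h =>
        let m := if h > st.1 then h else st.1
        (m, st.2 ++ [m])) (m, acc))).2 = acc ++ pmList m t := by
  induction t with
  | nil => intro m acc; simp [pmList]
  | cons h t ih =>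
    intro m acc
    simp only [List.foldl_cons, pmList]
    rw [ih]
    simp

lemma foldZ_eq (t : List Int) : ∀ (m idx : Int) (acc : List Int),
    ((((m :: pmList m t).zip (pmList m t)).foldl
      (fun (st : Int × List Int) pc =>
        (st.1 + 1, if pc.2 > pc.1 then st.2 ++ [st.1] else st.2))
      (idx, acc))).2 = acc ++ visAux m idx t := by
  induction t with
  | nil => intro m idx acc; simp [pmList, visAux]
  | cons h t ih =>
    intro m idx acc
    by_cases hc : h > m
    · have hm : (if h > m then h else m) = h := if_pos hc
      simp only [pmList, hm, List.zip_cons_cons, List.foldl_cons, visAux, if_pos hc]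
      rw [ih]
      simp
    · have hm : (if h > m then h else m) = m := if_neg hc
      simp only [pmList, hm, List.zip_cons_cons, List.foldl_cons, visAux, if_neg hc]
      have : ¬ (m > m) := lt_irrefl m
      rw [if_neg this, ih]

-- ===== VERDICT (by name: the statement is the Claim_ definition above) =====
theorem calc_visibles_spec : Claim_equal_calc_visibles := by
  intro ts _ hpre
  unfold Spec_calc_visibles calc_visibles calc_visibles_alt
  match ts with
  | [] => exact absurd rfl hpre
  | h :: t =>
    simp only
    rw [foldA_eq]
    have hpfx :
        (((h :: t).foldl (fun (st : Int × List Int) x =>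
            let m := if x > st.1 then x else st.1
            (m, st.2 ++ [m])) (h, ([] : List Int)))).2 = h :: pmList h t := by
      simp only [List.foldl_cons]
      have : (if h > h then h else h) = h := by simp
      rw [this, foldP_eq]
      simp
    rw [hpfx]
    have htail : (h :: pmList h t).tail = pmList h t := rfl
    rw [htail, foldZ_eq]
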